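-- pv_equiv track=rewrite | github.com/nermadie/CodeForces_Solutions | CodeforcesRound1050Div4/prob03.py | solve
-- ===== SOURCE A (Python) =====
-- def solve(n, m, a, b):
--   result = 0
--   for i in range(n):
--       if b[i] != b[i+1]:
--         a_delta = a[i+1] - a[i]
--         if a_delta % 2 == 0:
--           result += a_delta - 1
--         else:
--           result += a_delta
--       else:
--         a_delta = a[i+1] - a[i]
--         if a_delta % 2 == 0:
--           result += a_delta
--         else:
--           result += a_delta - 1
--   result += (m - a[n])
--   return result
-- ===== SOURCE B (Python) =====
-- def solve(n, m, a, b):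
--     bad = sum(1 for i in range(n)
--               if (b[i] != b[i+1]) == ((a[i+1] - a[i]) % 2 == 0))
--     return m - a[0] - bad
-- ===== Notes on version B (the rewrite author's own statement) =====
-- stated objective: simpler
-- what changed: The per-pair deltas telescope to a[n]-a[0], which cancels against the final +(m-a[n]), so B just counts the pairs whose parity/boundary condition costs 1 and returns m - a[0] - count, never accumulating delta values.
-- outside the precondition, e.g. on solve(-1, 10, [1, 2, 4], [0, 1, 1]): A returns 6, B returns 9
import Mathlib
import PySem

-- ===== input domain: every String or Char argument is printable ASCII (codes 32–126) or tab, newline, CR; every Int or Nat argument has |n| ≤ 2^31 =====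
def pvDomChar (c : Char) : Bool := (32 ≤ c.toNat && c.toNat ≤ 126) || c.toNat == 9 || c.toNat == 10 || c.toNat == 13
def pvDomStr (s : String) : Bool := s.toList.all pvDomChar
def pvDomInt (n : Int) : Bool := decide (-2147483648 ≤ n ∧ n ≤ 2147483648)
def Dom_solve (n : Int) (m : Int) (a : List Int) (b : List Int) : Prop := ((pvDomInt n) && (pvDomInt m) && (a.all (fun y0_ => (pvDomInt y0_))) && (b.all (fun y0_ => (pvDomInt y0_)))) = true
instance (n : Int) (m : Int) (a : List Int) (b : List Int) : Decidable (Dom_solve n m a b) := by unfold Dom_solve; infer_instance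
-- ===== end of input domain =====

-- B replaces A's delta accumulation by the telescoped closed form m - a[0] minus a count
-- of the pairs that cost 1 (objective: simpler).

-- ===== PORT A =====
def solve (n : Int) (m : Int) (a : List Int) (b : List Int) : Int :=
  let result : Int :=
    (PySem.List.pyRange 0 n 1).foldl (fun result i =>
      if PySem.List.pyGetD b i 0 ≠ PySem.List.pyGetD b (i + 1) 0 then
        let a_delta := PySem.List.pyGetD a (i + 1) 0 - PySem.List.pyGetD a i 0
        if PySem.Int.mod a_delta 2 = 0 then result + (a_delta - 1) else result + a_delta
      else
        let a_delta := PySem.List.pyGetD a (i + 1) 0 - PySem.List.pyGetD a i 0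
        if PySem.Int.mod a_delta 2 = 0 then result + a_delta else result + (a_delta - 1))
      0
  result + (m - PySem.List.pyGetD a n 0)

-- ===== PORT B =====
def solve_alt (n : Int) (m : Int) (a : List Int) (b : List Int) : Int :=
  let bad : Nat :=
    (PySem.List.pyRange 0 n 1).countP (fun i =>
      (PySem.List.pyGetD b i 0 != PySem.List.pyGetD b (i + 1) 0)
        == decide (PySem.Int.mod (PySem.List.pyGetD a (i + 1) 0 - PySem.List.pyGetD a i 0) 2 = 0))
  m - PySem.List.pyGetD a 0 0 - (bad : Int)

-- ===== PRECONDITION & SPEC =====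
-- Pre_ restricts to the natural domain of this contest helper (n = number of adjacent
-- pairs): it excludes negative n, where A's value comes from Python's accidental
-- negative-index wraparound of a[n], and the short lists on which A raises IndexError.
def Pre_solve (n : Int) (m : Int) (a : List Int) (b : List Int) : Prop :=
  0 ≤ n ∧ n < (a.length : Int) ∧ (n = 0 ∨ n < (b.length : Int))
instance (n : Int) (m : Int) (a : List Int) (b : List Int) : Decidable (Pre_solve n m a b) := by unfold Pre_solve; infer_instance
def pvWitness_solve : Int × Int × List Int × List Int := (2, 10, [1, 2, 4], [0, 1, 1])

def Spec_solve (n : Int) (m : Int) (a : List Int) (b : List Int) (out : Int) : Prop := out = solve_alt n m a b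
instance (n : Int) (m : Int) (a : List Int) (b : List Int) (out : Int) : Decidable (Spec_solve n m a b out) := by unfold Spec_solve; infer_instance

-- ===== CLAIM (what is proved, stated in full; the proofs are below) =====
def Claim_equal_solve : Prop := ∀ (n : Int) (m : Int) (a : List Int) (b : List Int), Dom_solve n m a b → Pre_solve n m a b → Spec_solve n m a b (solve n m a b)

-- ===== LEMMAS AND PROOFS =====

-- The generic telescoping invariant: if every step adds g(i+1) - g(i) minus a 0/1
-- charge decided by p, the fold over range(0,k) telescopes to g k - g 0 - count p.
theorem telescope_foldl (f : Int → Int → Int) (g : Int → Int) (p : Int → Bool)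
    (hf : ∀ acc i, f acc i = acc + (g (i + 1) - g i) - (if p i then 1 else 0)) :
    ∀ (k : Nat),
      (PySem.List.pyRange 0 (k : Int) 1).foldl f 0
        = g k - g 0 - ((PySem.List.pyRange 0 (k : Int) 1).countP p : Nat) := by
  intro k
  induction k with
  | zero => simp [PySem.List.pyRange_one_eq_nil]
  | succ k ih =>
    have hsplit : PySem.List.pyRange 0 ((k : Nat) + 1 : Int) 1
        = PySem.List.pyRange 0 (k : Int) 1 ++ [(k : Int)] :=
      PySem.List.pyRange_one_succ_right (by positivity)
    push_cast
    rw [hsplit, List.foldl_append, List.countP_append]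
    simp only [List.foldl_cons, List.foldl_nil]
    rw [ih, hf]
    by_cases hp : p (k : Int) = true <;> simp [hp] <;> ring

theorem step_eq (a b : List Int) (acc i : Int) :
    (if PySem.List.pyGetD b i 0 ≠ PySem.List.pyGetD b (i + 1) 0 then
        let a_delta := PySem.List.pyGetD a (i + 1) 0 - PySem.List.pyGetD a i 0
        if PySem.Int.mod a_delta 2 = 0 then acc + (a_delta - 1) else acc + a_delta
      else
        let a_delta := PySem.List.pyGetD a (i + 1) 0 - PySem.List.pyGetD a i 0
        if PySem.Int.mod a_delta 2 = 0 then acc + a_delta else acc + (a_delta - 1))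
    = acc + (PySem.List.pyGetD a (i + 1) 0 - PySem.List.pyGetD a i 0)
        - (if (PySem.List.pyGetD b i 0 != PySem.List.pyGetD b (i + 1) 0)
              == decide (PySem.Int.mod (PySem.List.pyGetD a (i + 1) 0 - PySem.List.pyGetD a i 0) 2 = 0)
           then 1 else 0) := by
  by_cases hb : PySem.List.pyGetD b i 0 = PySem.List.pyGetD b (i + 1) 0 <;>
    by_cases hm : PySem.Int.mod (PySem.List.pyGetD a (i + 1) 0 - PySem.List.pyGetD a i 0) 2 = 0
  · simp only [hb, hm, ne_eq, not_true_eq_false, not_false_eq_true, if_true, if_false]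
    rw [if_neg (by simp)]
    ring
  · simp only [hb, hm, ne_eq, not_true_eq_false, not_false_eq_true, if_true, if_false]
    rw [if_pos (by simp [hm])]
    ring
  · simp only [hb, hm, ne_eq, not_true_eq_false, not_false_eq_true, if_true, if_false]
    rw [if_pos (by simp [bne_iff_ne, hb])]
    ring
  · simp only [hb, hm, ne_eq, not_true_eq_false, not_false_eq_true, if_true, if_false]
    rw [if_neg (by simp [bne_iff_ne, hb, hm])]
    ring

theorem solve_spec_aux (n m : Int) (a b : List Int)
    (hpre : Pre_solve n m a b) : solve n m a b = solve_alt n m a b := by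
  obtain ⟨hn, -, -⟩ := hpre
  obtain ⟨k, rfl⟩ : ∃ k : Nat, n = (k : Int) := ⟨n.toNat, (Int.toNat_of_nonneg hn).symm⟩
  unfold solve
  rw [telescope_foldl _ (fun i => PySem.List.pyGetD a i 0)
        (fun i => (PySem.List.pyGetD b i 0 != PySem.List.pyGetD b (i + 1) 0)
          == decide (PySem.Int.mod (PySem.List.pyGetD a (i + 1) 0 - PySem.List.pyGetD a i 0) 2 = 0))
        (fun acc i => step_eq a b acc i) k]
  simp only [solve_alt]
  ring

-- ===== VERDICT (by name: the statement is the Claim_ definition above) =====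
theorem solve_spec : Claim_equal_solve := by
  intro n m a b _ hpre
  exact solve_spec_aux n m a b hpre
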